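-- pv_equiv track=rewrite | github.com/kissdevil/illuminator-spark | src/main/python/crfpyspark-streaming.py | bigram
-- ===== SOURCE A (Python) =====
-- def bigram(stringList, brandDict):
--     if len(stringList) < 2:
--         return unigram(stringList, brandDict)
--     for i in range(len(stringList) - 1):
--         if ' '.join([stringList[i], stringList[i + 1]]) in brandDict:
--             # print (' '.join([stringList[i], stringList[i+1]]))
--             if i == len(stringList) - 2:  # if i is the second to last word
--                 return (unigram(stringList[0:i], brandDict) + ' ' + brandDict[
--                     ' '.join([stringList[i], stringList[i + 1]])]).strip()
--             else:
--                 return (unigram(stringList[0:i], brandDict) + ' ' + brandDict[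
--                     ' '.join([stringList[i], stringList[i + 1]])] + ' ' + bigram(stringList[i + 2:], brandDict)).strip()
--     return unigram(stringList, brandDict)
--
-- def unigram(stringList, brandDict):
--     res = ''
--     for s in stringList:
--         if s in brandDict:
--             res = res + brandDict[s] + ' '
--         else:
--             res = res + s + ' '
--     return (res.strip())
-- ===== SOURCE B (Python) =====
-- def bigram(stringList, brandDict):
--     # One forward pass: split the word list into unigram runs separated by the
--     # greedily matched brand bigrams; then assemble right-to-left (matching the
--     # nesting of the stripped concatenations).
--     parts = []
--     seg = []
--     i, n = 0, len(stringList)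
--     while i < n:
--         if i + 1 < n and stringList[i] + ' ' + stringList[i + 1] in brandDict:
--             parts.append((' '.join(seg).strip(),
--                           brandDict[stringList[i] + ' ' + stringList[i + 1]]))
--             seg = []
--             i += 2
--         else:
--             w = stringList[i]
--             seg.append(brandDict.get(w, w))
--             i += 1
--     res = ' '.join(seg).strip()
--     for u, v in reversed(parts):
--         res = (u + ' ' + v + ' ' + res).strip()
--     return res
-- ===== Notes on version B (the rewrite author's own statement) =====
-- stated objective: faster
-- what changed: Replaced A's recursion with list slicing and a restarted scan (plus string re-concatenation per unigram run) by a single forward pass with an index pointer that collects (unigram-run, matched-bigram-value) parts, joined and assembled once at the end.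
import Mathlib
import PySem

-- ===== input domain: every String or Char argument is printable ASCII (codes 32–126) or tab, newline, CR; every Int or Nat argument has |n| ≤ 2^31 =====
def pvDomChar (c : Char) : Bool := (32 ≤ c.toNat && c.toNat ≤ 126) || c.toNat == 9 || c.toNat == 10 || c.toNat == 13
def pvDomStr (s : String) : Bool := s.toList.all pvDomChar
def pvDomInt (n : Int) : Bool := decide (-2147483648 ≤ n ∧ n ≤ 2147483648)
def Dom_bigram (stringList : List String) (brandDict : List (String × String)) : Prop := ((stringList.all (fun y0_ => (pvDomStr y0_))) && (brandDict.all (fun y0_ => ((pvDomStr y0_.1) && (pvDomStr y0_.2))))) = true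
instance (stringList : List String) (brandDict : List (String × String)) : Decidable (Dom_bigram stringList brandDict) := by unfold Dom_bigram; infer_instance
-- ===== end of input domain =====

-- B replaces A's O(n^2) recursion-with-slicing by a single forward pass that splits the
-- word list into unigram runs and matched brand bigrams, assembled once at the end (alternative decomposition).


-- ===== PORT A =====
-- literal port of Source A's unigram: accumulate 'res + word + " "' then strip
def unigram (stringList : List String) (brandDict : List (String × String)) : String :=
  PySem.Str.strip (stringList.foldl (fun res s =>
      match PySem.Dict.get? ⟨brandDict⟩ s with
      | some v => res ++ v ++ " "
      | none   => res ++ s ++ " ") "")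

-- Source A's 'for i in range(len-1)' loop is bigramLoop; indices are always in range (i+1 < len),
-- so getD never takes its default; slices [0:i] / [i+2:] with nonnegative in-range bounds are take/drop.
mutual
def bigram (stringList : List String) (brandDict : List (String × String)) : String :=
  if stringList.length < 2 then unigram stringList brandDict
  else bigramLoop stringList brandDict 0
termination_by (stringList.length, stringList.length + 1)

def bigramLoop (stringList : List String) (brandDict : List (String × String)) (i : Nat) : String :=
  if h : i < stringList.length - 1 then
    match PySem.Dict.get? ⟨brandDict⟩ (stringList.getD i "" ++ " " ++ stringList.getD (i+1) "") with
    | some v =>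
      if i == stringList.length - 2 then
        PySem.Str.strip (unigram (stringList.take i) brandDict ++ " " ++ v)
      else
        PySem.Str.strip (unigram (stringList.take i) brandDict ++ " " ++ v ++ " " ++
          bigram (stringList.drop (i+2)) brandDict)
    | none => bigramLoop stringList brandDict (i+1)
  else unigram stringList brandDict
termination_by (stringList.length, stringList.length - i)
decreasing_by
  · simp [List.length_drop]; omega
  · exact Prod.Lex.right _ (by omega)
end

-- ===== PORT B =====
-- Source B's while loop: one forward pass collecting (stripped unigram run, bigram value) parts
def bigramAltLoop (brandDict : List (String × String)) :
    List String → List (String × String) → List String → List (String × String) × List String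
  | [], parts, seg => (parts, seg)
  | [w], parts, seg => (parts, seg ++ [PySem.Dict.getD ⟨brandDict⟩ w w])
  | a :: b :: rest, parts, seg =>
    match PySem.Dict.get? ⟨brandDict⟩ (a ++ " " ++ b) with
    | some v => bigramAltLoop brandDict rest
        (parts ++ [(PySem.Str.strip (PySem.Str.join " " seg), v)]) []
    | none => bigramAltLoop brandDict (b :: rest) parts
        (seg ++ [PySem.Dict.getD ⟨brandDict⟩ a a])

-- Source B's final 'for u, v in reversed(parts)' assembly is the foldr
def bigram_alt (stringList : List String) (brandDict : List (String × String)) : String :=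
  match bigramAltLoop brandDict stringList [] [] with
  | (parts, seg) =>
    parts.foldr (fun uv res => PySem.Str.strip (uv.1 ++ " " ++ uv.2 ++ " " ++ res))
      (PySem.Str.strip (PySem.Str.join " " seg))

-- ===== PRECONDITION & SPEC =====
def Spec_bigram (stringList : List String) (brandDict : List (String × String)) (out : String) : Prop := out = bigram_alt stringList brandDict
instance (stringList : List String) (brandDict : List (String × String)) (out : String) : Decidable (Spec_bigram stringList brandDict out) := by unfold Spec_bigram; infer_instance

-- ===== CLAIM (what is proved, stated in full; the proofs are below) =====
def Claim_equal_bigram : Prop := ∀ (stringList : List String) (brandDict : List (String × String)), Dom_bigram stringList brandDict → Spec_bigram stringList brandDict (bigram stringList brandDict)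

-- ===== LEMMAS AND PROOFS =====

-- mapped word (brandDict.get(w, w))
def pvM (d : List (String × String)) (s : String) : String := PySem.Dict.getD ⟨d⟩ s s
-- stripped join of a run
def pvJ (seg : List String) : String := PySem.Str.strip (PySem.Str.join " " seg)
-- the final assembly of B
def pvAsm (p : List (String × String) × List String) : String :=
  p.1.foldr (fun uv res => PySem.Str.strip (uv.1 ++ " " ++ uv.2 ++ " " ++ res)) (pvJ p.2)
-- unigram's raw accumulation
def pvU (d : List (String × String)) : List String → String
  | [] => ""
  | s :: t => pvM d s ++ " " ++ pvU d t

theorem str_ext {s t : String} (h : s.toList = t.toList) : s = t := by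
  have := congrArg String.ofList h
  simpa [String.ofList_toList] using this

theorem isspace_space : PySem.Chars.isspace ' ' = true := by decide

theorem rstrip_append_space (l : List Char) :
    PySem.Chars.rstrip (l ++ [' ']) = PySem.Chars.rstrip l := by
  simp [PySem.Chars.rstrip, isspace_space]

theorem chars_strip_append_space (l : List Char) :
    PySem.Chars.strip (l ++ [' ']) = PySem.Chars.strip l := by
  unfold PySem.Chars.strip PySem.Chars.lstrip
  rw [List.dropWhile_append]
  by_cases hl : (List.dropWhile PySem.Chars.isspace l).isEmpty
  · rw [if_pos hl]
    have h3 : List.dropWhile PySem.Chars.isspace l = [] := by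
      simpa [List.isEmpty_iff] using hl
    rw [h3]
    simp [List.dropWhile, isspace_space]
  · rw [if_neg hl, rstrip_append_space]

theorem strip_append_space (s : String) : PySem.Str.strip (s ++ " ") = PySem.Str.strip s := by
  apply str_ext
  simp [PySem.Str.strip, chars_strip_append_space]

theorem join_singleton (x : String) : PySem.Str.join " " [x] = x := by
  simp [PySem.Str.join, PySem.Chars.join, List.intercalate]

theorem join_cons_cons (x y : String) (r : List String) :
    PySem.Str.join " " (x :: y :: r) = x ++ " " ++ PySem.Str.join " " (y :: r) := by
  apply str_ext
  simp [PySem.Str.join, PySem.Chars.join_cons_cons]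

theorem join_nil : PySem.Str.join " " [] = "" := by decide

theorem bigram_alt_eq (l : List String) (d : List (String × String)) :
    bigram_alt l d = pvAsm (bigramAltLoop d l [] []) := by
  rcases h : bigramAltLoop d l [] [] with ⟨parts, seg⟩
  simp [bigram_alt, pvAsm, pvJ, h]

theorem unigram_step (d : List (String × String)) (res s : String) :
    (match PySem.Dict.get? (⟨d⟩ : PySem.Dict String String) s with
      | some v => res ++ v ++ " "
      | none   => res ++ s ++ " ") = res ++ (pvM d s ++ " ") := by
  cases h : PySem.Dict.get? (⟨d⟩ : PySem.Dict String String) s <;>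
    simp [pvM, PySem.Dict.getD, h, String.append_assoc]

theorem foldl_unigram (d : List (String × String)) :
    ∀ (l : List String) (res : String),
      l.foldl (fun res s =>
        match PySem.Dict.get? (⟨d⟩ : PySem.Dict String String) s with
        | some v => res ++ v ++ " "
        | none   => res ++ s ++ " ") res = res ++ pvU d l := by
  intro l
  induction l with
  | nil => intro res; simp [pvU]
  | cons s t ih =>
    intro res
    rw [List.foldl_cons, unigram_step, ih, pvU]
    simp [String.append_assoc]

theorem pvU_eq (d : List (String × String)) :
    ∀ (l : List String), l ≠ [] → pvU d l = PySem.Str.join " " (l.map (pvM d)) ++ " " := by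
  intro l
  induction l with
  | nil => intro h; exact absurd rfl h
  | cons s t ih =>
    intro _
    cases t with
    | nil => simp [pvU, join_singleton]
    | cons y r =>
      rw [show pvU d (s :: y :: r) = pvM d s ++ " " ++ pvU d (y :: r) from rfl,
          ih (by simp)]
      simp [join_cons_cons, String.append_assoc]

theorem unigram_eq (l : List String) (d : List (String × String)) :
    unigram l d = pvJ (l.map (pvM d)) := by
  unfold unigram pvJ
  cases l with
  | nil => simp [join_nil]
  | cons s t =>
    rw [foldl_unigram d, pvU_eq d _ (by simp)]
    simp only [List.map_cons]
    rw [show ("" : String) ++ (PySem.Str.join " " (pvM d s :: t.map (pvM d)) ++ " ") =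
        PySem.Str.join " " (pvM d s :: t.map (pvM d)) ++ " " by simp]
    exact strip_append_space _

theorem altLoop_acc (d : List (String × String)) :
    ∀ (l : List String) (parts : List (String × String)) (seg : List String),
      bigramAltLoop d l parts seg =
        (parts ++ (bigramAltLoop d l [] seg).1, (bigramAltLoop d l [] seg).2) := by
  have H : ∀ (n : Nat) (l : List String), l.length ≤ n →
      ∀ (parts : List (String × String)) (seg : List String),
      bigramAltLoop d l parts seg =
        (parts ++ (bigramAltLoop d l [] seg).1, (bigramAltLoop d l [] seg).2) := by
    intro n
    induction n with
    | zero =>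
      intro l hl parts seg
      have : l = [] := List.eq_nil_of_length_eq_zero (Nat.le_zero.mp hl)
      subst this; simp [bigramAltLoop]
    | succ n ih =>
      intro l hl parts seg
      match l with
      | [] => simp [bigramAltLoop]
      | [w] => simp [bigramAltLoop]
      | a :: b :: rest =>
        cases hg : PySem.Dict.get? (⟨d⟩ : PySem.Dict String String) (a ++ " " ++ b) with
        | some v =>
          simp only [bigramAltLoop, hg, List.nil_append]
          rw [ih rest (by simp only [List.length_cons] at hl; omega),
              ih rest (by simp only [List.length_cons] at hl; omega)
                [(PySem.Str.strip (PySem.Str.join " " seg), v)]]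
          simp
        | none =>
          simp only [bigramAltLoop, hg]
          rw [ih (b :: rest) (by simp only [List.length_cons] at hl ⊢; omega) parts,
              ih (b :: rest) (by simp only [List.length_cons] at hl ⊢; omega) []]
  intro l parts seg
  exact H l.length l le_rfl parts seg

theorem pvAsm_cons (u v : String) (ps : List (String × String)) (seg : List String) :
    pvAsm ((u, v) :: ps, seg) = PySem.Str.strip (u ++ " " ++ v ++ " " ++ pvAsm (ps, seg)) := rfl

theorem main_eq : ∀ (n : Nat) (l : List String) (d : List (String × String)),
    l.length ≤ n → bigram l d = bigram_alt l d := by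
  intro n
  induction n with
  | zero =>
    intro l d hl
    have : l = [] := List.eq_nil_of_length_eq_zero (Nat.le_zero.mp hl)
    subst this
    rw [bigram, bigram_alt_eq]
    rw [if_pos (by simp)]
    simp only [bigramAltLoop, pvAsm, pvJ]
    simpa using unigram_eq [] d
  | succ n ih =>
    intro l d hl
    -- the loop invariant: bigramLoop from index i = B's assembly of the rest, with
    -- the mapped prefix as the pending segment
    have loop : ∀ (k i : Nat), l.length - i ≤ k →
        bigramLoop l d i = pvAsm (bigramAltLoop d (l.drop i) [] ((l.take i).map (pvM d))) := by
      intro k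
      induction k with
      | zero =>
        intro i hi
        have hlen : l.length ≤ i := by omega
        have hdrop : l.drop i = [] := List.drop_eq_nil_of_le hlen
        have htake : l.take i = l := List.take_of_length_le hlen
        rw [bigramLoop, dif_neg (by omega), hdrop, htake]
        simp only [bigramAltLoop]
        simpa [pvAsm, pvJ] using unigram_eq l d
      | succ k ihk =>
        intro i hi
        rw [bigramLoop]
        by_cases h : i < l.length - 1
        · rw [dif_pos h]
          have hi1 : i < l.length := by omega
          have hi2 : i + 1 < l.length := by omega
          have hd1 : l.drop i = l[i] :: l.drop (i + 1) := List.drop_eq_getElem_cons hi1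
          have hd2 : l.drop (i + 1) = l[i + 1] :: l.drop (i + 2) := List.drop_eq_getElem_cons hi2
          rw [List.getD_eq_getElem l "" hi1, List.getD_eq_getElem l "" hi2]
          rw [hd1, hd2]
          cases hg : PySem.Dict.get? (⟨d⟩ : PySem.Dict String String) (l[i] ++ " " ++ l[i + 1]) with
          | some v =>
            simp only [bigramAltLoop, hg]
            rw [altLoop_acc]
            have hu : PySem.Str.strip (PySem.Str.join " " ((l.take i).map (pvM d))) =
                unigram (l.take i) d := by rw [unigram_eq]; rfl
            by_cases hlast : i = l.length - 2
            · rw [if_pos (by simpa using hlast)]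
              have hrest : l.drop (i + 2) = [] := List.drop_eq_nil_of_le (by omega)
              rw [hrest]
              simp only [bigramAltLoop, List.nil_append, List.append_nil]
              rw [pvAsm_cons, hu,
                show pvAsm (([] : List (String × String)), ([] : List String)) = "" from by decide]
              rw [show unigram (l.take i) d ++ " " ++ v ++ " " ++ "" =
                  unigram (l.take i) d ++ " " ++ v ++ " " by simp]
              exact (strip_append_space _).symm
            · rw [if_neg (by simpa using hlast)]
              have happ : ((PySem.Str.strip (PySem.Str.join " " ((l.take i).map (pvM d))), v) ::
                  (bigramAltLoop d (l.drop (i + 2)) [] []).1) =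
                  [(PySem.Str.strip (PySem.Str.join " " ((l.take i).map (pvM d))), v)] ++
                  (bigramAltLoop d (l.drop (i + 2)) [] []).1 := by simp
              rw [show ([] : List (String × String)) ++
                  [(PySem.Str.strip (PySem.Str.join " " ((l.take i).map (pvM d))), v)] =
                  [(PySem.Str.strip (PySem.Str.join " " ((l.take i).map (pvM d))), v)] by simp]
              have hcons : pvAsm ((PySem.Str.strip (PySem.Str.join " " ((l.take i).map (pvM d))), v) ::
                    (bigramAltLoop d (l.drop (i + 2)) [] []).1,
                    (bigramAltLoop d (l.drop (i + 2)) [] []).2) =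
                  PySem.Str.strip (PySem.Str.strip (PySem.Str.join " " ((l.take i).map (pvM d))) ++
                    " " ++ v ++ " " ++ pvAsm (bigramAltLoop d (l.drop (i + 2)) [] [])) := rfl
              simp only [List.singleton_append]
              rw [hcons, hu]
              rw [← bigram_alt_eq (l.drop (i + 2)) d]
              rw [← ih (l.drop (i + 2)) d (by simp [List.length_drop]; omega)]
          | none =>
            simp only [bigramAltLoop, hg]
            have htake1 : (l.take (i + 1)).map (pvM d) = (l.take i).map (pvM d) ++ [pvM d l[i]] := by
              rw [List.take_add_one, List.getElem?_eq_getElem hi1, List.map_append]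
              rfl
            rw [ihk (i + 1) (by omega), htake1, ← hd2]
            rfl
        · rw [dif_neg h]
          have hle : l.length - i ≤ 1 := by omega
          rcases Nat.lt_or_ge i l.length with hlt | hge
          · have hone : l.length = i + 1 := by omega
            have hd1 : l.drop i = [l[i]] := by
              rw [List.drop_eq_getElem_cons hlt, List.drop_eq_nil_of_le (by omega)]
            rw [hd1]
            simp only [bigramAltLoop]
            have h1 : List.take i l ++ [l[i]] = l := by
              have h2 := List.take_add_one (l := l) (i := i)
              rw [List.getElem?_eq_getElem hlt] at h2
              simp only [Option.toList_some] at h2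
              rw [← h2, List.take_of_length_le (by omega)]
            have htake : (l.take i).map (pvM d) ++ [pvM d l[i]] = l.map (pvM d) := by
              conv_rhs => rw [← h1]
              rw [List.map_append]
              rfl
            rw [unigram_eq]
            show pvJ (List.map (pvM d) l) =
              pvAsm ([], (l.take i).map (pvM d) ++ [PySem.Dict.getD ⟨d⟩ l[i] l[i]])
            rw [show PySem.Dict.getD (⟨d⟩ : PySem.Dict String String) l[i] l[i] = pvM d l[i] from rfl,
                htake]
            rfl
          · have hdrop : l.drop i = [] := List.drop_eq_nil_of_le hge
            have htake : l.take i = l := List.take_of_length_le hge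
            rw [hdrop, htake]
            simp only [bigramAltLoop]
            simpa [pvAsm, pvJ] using unigram_eq l d
    rw [bigram]
    by_cases h2 : l.length < 2
    · rw [if_pos h2, bigram_alt_eq]
      match l, h2 with
      | [], _ => simp [bigramAltLoop, pvAsm, unigram_eq, pvJ]
      | [w], _ =>
        simp only [bigramAltLoop, List.nil_append]
        rw [unigram_eq]
        rfl
    · rw [if_neg h2, loop l.length 0 (by omega)]
      simp only [List.drop_zero, List.take_zero, List.map_nil]
      exact (bigram_alt_eq l d).symm

-- ===== VERDICT (by name: the statement is the Claim_ definition above) =====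
theorem bigram_spec : Claim_equal_bigram := by
  intro l d _
  unfold Spec_bigram
  exact main_eq l.length l d le_rfl
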